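-- pv_equiv track=rewrite | github.com/alwaysblueai/quant-lab | src/alpha_lab/reporting/renderers/case_report.py | _extract_objective
-- ===== SOURCE A (Python) =====
-- def _extract_objective(summary_text: str | None) -> str | None:
--     if summary_text is None:
--         return None
--     lines = [line.strip() for line in summary_text.splitlines()]
--     if not lines:
--         return None
--
--     for line in lines:
--         lowered = line.lower()
--         if lowered.startswith("objective:"):
--             return line.split(":", 1)[1].strip() or None
--
--     for idx, line in enumerate(lines):
--         if line.lower().startswith("## objective"):
--             for candidate in lines[idx + 1 :]:
--                 if candidate and not candidate.startswith("#"):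
--                     return candidate
--             break
--
--     return None
-- ===== SOURCE B (Python) =====
-- def _extract_objective(summary_text: str | None) -> str | None:
--     # Single pass with a state machine: header-seen flag + candidate slot.
--     if summary_text is None:
--         return None
--     seen = False
--     cand = None
--     for line in summary_text.splitlines():
--         line = line.strip()
--         lowered = line.lower()
--         if lowered.startswith("objective:"):
--             return line.split(":", 1)[1].strip() or None
--         elif seen and cand is None and line and not line.startswith("#"):
--             cand = line
--         elif not seen and lowered.startswith("## objective"):
--             seen = True
--     return cand
-- ===== Notes on version B (the rewrite author's own statement) =====
-- stated objective: simpler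
-- what changed: Replaced A's two full scans plus a nested slice scan after the header with a single pass over the stripped lines maintaining a header-seen flag and a candidate slot, returning the colon value immediately and the candidate at the end.
import Mathlib
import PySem

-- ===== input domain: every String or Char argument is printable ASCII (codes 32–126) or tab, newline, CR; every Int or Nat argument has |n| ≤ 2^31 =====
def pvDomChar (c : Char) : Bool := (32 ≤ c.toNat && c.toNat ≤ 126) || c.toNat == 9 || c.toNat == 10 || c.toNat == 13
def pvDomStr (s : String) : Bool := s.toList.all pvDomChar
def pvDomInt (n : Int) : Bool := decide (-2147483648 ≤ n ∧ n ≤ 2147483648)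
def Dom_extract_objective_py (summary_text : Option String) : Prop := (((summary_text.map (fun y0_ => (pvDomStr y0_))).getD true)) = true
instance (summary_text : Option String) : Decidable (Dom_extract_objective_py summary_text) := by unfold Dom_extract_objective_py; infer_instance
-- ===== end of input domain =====

-- B is a single pass maintaining a header-seen flag and a candidate slot instead of
-- A's two full scans plus a nested slice scan; objective: simpler (same result, one traversal).

-- 'x or None' for a string result
def pvOrNone (s : String) : Option String := if s = "" then none else some s

-- line.split(":", 1)[1].strip() — index 1 always exists here since the line starts with "objective:" so contains ':'
def pvColonTail (line : String) : String :=
  PySem.Str.strip (((PySem.Str.splitMax? line ":" 1).getD []).getD 1 "")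

-- ===== PORT A =====
-- first loop: for line in lines: if lowered.startswith("objective:"): return …
def pvA_loop1 : List String → Option (Option String)
  | [] => none
  | line :: rest =>
    let lowered := PySem.Str.lower line
    if PySem.Str.startswith lowered "objective:" then
      some (pvOrNone (pvColonTail line))
    else pvA_loop1 rest

-- inner loop: for candidate in lines[idx+1:]
def pvA_loop3 : List String → Option String
  | [] => none
  | c :: rest =>
    if c ≠ "" && !PySem.Str.startswith c "#" then some c else pvA_loop3 rest

-- second loop: for idx, line in enumerate(lines): if header: scan lines[idx+1:]; break
def pvA_loop2 : List String → Option String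
  | [] => none
  | line :: rest =>
    if PySem.Str.startswith (PySem.Str.lower line) "## objective" then pvA_loop3 rest
    else pvA_loop2 rest

def extract_objective_py (summary_text : Option String) : Option String :=
  match summary_text with
  | none => none
  | some t =>
    let lines := (PySem.Str.splitlines t).map PySem.Str.strip
    if lines = [] then none
    else
      match pvA_loop1 lines with
      | some r => r
      | none => pvA_loop2 lines

-- ===== PORT B =====
def pvB_go : List String → Bool → Option String → Option String
  | [], _, cand => cand
  | line :: rest, seen, cand =>
    let lowered := PySem.Str.lower line
    if PySem.Str.startswith lowered "objective:" then
      pvOrNone (pvColonTail line)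
    else if seen && cand.isNone && line ≠ "" && !PySem.Str.startswith line "#" then
      pvB_go rest seen (some line)
    else if !seen && PySem.Str.startswith lowered "## objective" then
      pvB_go rest true cand
    else pvB_go rest seen cand

def extract_objective_py_alt (summary_text : Option String) : Option String :=
  match summary_text with
  | none => none
  | some t => pvB_go ((PySem.Str.splitlines t).map PySem.Str.strip) false none

-- ===== PRECONDITION & SPEC =====
def Spec_extract_objective_py (summary_text : Option String) (out : Option String) : Prop := out = extract_objective_py_alt summary_text
instance (summary_text : Option String) (out : Option String) : Decidable (Spec_extract_objective_py summary_text out) := by unfold Spec_extract_objective_py; infer_instance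

-- ===== CLAIM (what is proved, stated in full; the proofs are below) =====
def Claim_equal_extract_objective_py : Prop := ∀ (summary_text : Option String), Dom_extract_objective_py summary_text → Spec_extract_objective_py summary_text (extract_objective_py summary_text)

-- ===== LEMMAS AND PROOFS =====

-- once the candidate slot is filled, only a later "objective:" line can change the result
theorem pvB_go_filled (lines : List String) (c : String) :
    pvB_go lines true (some c) =
      match pvA_loop1 lines with
      | some r => r
      | none => some c := by
  induction lines with
  | nil => simp [pvB_go, pvA_loop1]
  | cons line rest ih =>
    simp only [pvB_go, pvA_loop1]
    split_ifs <;> simp_all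

-- after the header was seen (candidate still empty): first candidate wins unless a colon line appears
theorem pvB_go_seen (lines : List String) :
    pvB_go lines true none =
      match pvA_loop1 lines with
      | some r => r
      | none => pvA_loop3 lines := by
  induction lines with
  | nil => simp [pvB_go, pvA_loop1, pvA_loop3]
  | cons line rest ih =>
    simp only [pvB_go, pvA_loop1, pvA_loop3]
    split_ifs <;> simp_all [pvB_go_filled]

-- before the header: B reduces to A's colon scan then A's header scan
theorem pvB_go_unseen (lines : List String) :
    pvB_go lines false none =
      match pvA_loop1 lines with
      | some r => r
      | none => pvA_loop2 lines := by
  induction lines with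
  | nil => simp [pvB_go, pvA_loop1, pvA_loop2]
  | cons line rest ih =>
    simp only [pvB_go, pvA_loop1, pvA_loop2]
    split_ifs <;> simp_all [pvB_go_seen]

-- ===== VERDICT (by name: the statement is the Claim_ definition above) =====
theorem extract_objective_py_spec : Claim_equal_extract_objective_py := by
  unfold Claim_equal_extract_objective_py
  intro summary_text _
  unfold Spec_extract_objective_py extract_objective_py extract_objective_py_alt
  match summary_text with
  | none => rfl
  | some t =>
    simp only []
    by_cases hl : (PySem.Str.splitlines t).map PySem.Str.strip = []
    · simp [hl, pvB_go]
    · simp [hl, pvB_go_unseen]
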